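-- pv_equiv track=rewrite | github.com/Ilya-bmx/cherednik_lab | src/main/java/com/company/SR_simple_field.py | max_and_index
-- ===== SOURCE A (Python) =====
-- def max_and_index(a):
--     m = 0  # Максимум
--     p = 0  # Позиция максимума
--     for i in range(len(a)):
--         if a[i] > m:
--             m = a[i]
--             p = i
--     return m, p
-- ===== SOURCE B (Python) =====
-- def max_and_index(a):
--     m = 0
--     for x in a:
--         if x > m:
--             m = x
--     p = a.index(m) if m > 0 else 0
--     return m, p
-- ===== Notes on version B (the rewrite author's own statement) =====
-- stated objective: simpler
-- what changed: Splits A's fused max+position loop into a plain 0-floored max pass followed by a separate first-occurrence index lookup (a.index) guarded by m > 0.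
import Mathlib
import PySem

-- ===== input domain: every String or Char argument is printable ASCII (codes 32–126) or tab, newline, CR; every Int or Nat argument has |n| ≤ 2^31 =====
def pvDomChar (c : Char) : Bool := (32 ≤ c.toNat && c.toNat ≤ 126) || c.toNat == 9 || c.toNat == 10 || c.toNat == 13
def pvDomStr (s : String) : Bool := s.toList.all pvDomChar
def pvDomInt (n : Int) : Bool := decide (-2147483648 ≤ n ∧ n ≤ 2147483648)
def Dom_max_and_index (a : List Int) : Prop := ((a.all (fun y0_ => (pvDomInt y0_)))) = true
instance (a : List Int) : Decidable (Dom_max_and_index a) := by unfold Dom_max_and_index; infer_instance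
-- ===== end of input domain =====

-- B replaces A's fused max+position loop by a 0-floored max pass and a separate guarded first-index lookup (objective: simpler).

-- ===== PORT A =====
-- for i in range(len(a)): if a[i] > m: m = a[i]; p = i   — structural recursion carrying (index, (m, p))
def pvLoopA : List Int → Int → Int × Int → Int × Int
  | [], _, s => s
  | x :: xs, i, s => pvLoopA xs (i + 1) (if x > s.1 then (x, i) else s)

def max_and_index (a : List Int) : Int × Int := pvLoopA a 0 (0, 0)

-- ===== PORT B =====
def max_and_index_alt (a : List Int) : Int × Int :=
  let m := a.foldl (fun m x => if x > m then x else m) 0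
  -- 'a.index(m) if m > 0 else 0'; the 'none' branch is unreachable (m > 0 forces m ∈ a)
  let p : Int := if m > 0 then (match PySem.List.index? a m with
                                | some k => (k : Int)
                                | none => 0) else 0
  (m, p)

-- ===== PRECONDITION & SPEC =====
def Spec_max_and_index (a : List Int) (out : Int × Int) : Prop := out = max_and_index_alt a
instance (a : List Int) (out : Int × Int) : Decidable (Spec_max_and_index a out) := by unfold Spec_max_and_index; infer_instance

-- ===== CLAIM (what is proved, stated in full; the proofs are below) =====
def Claim_equal_max_and_index : Prop := ∀ (a : List Int), Dom_max_and_index a → Spec_max_and_index a (max_and_index a)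

-- ===== LEMMAS AND PROOFS =====
def pvFMax (xs : List Int) (m : Int) : Int := xs.foldl (fun m x => if x > m then x else m) m

theorem pvFMax_cons (x : Int) (xs : List Int) (m : Int) :
    pvFMax (x :: xs) m = pvFMax xs (if x > m then x else m) := rfl

theorem pvFMax_ge (xs : List Int) : ∀ m : Int, m ≤ pvFMax xs m := by
  induction xs with
  | nil => intro m; simp [pvFMax]
  | cons x xs ih =>
    intro m
    rw [pvFMax_cons]
    have h := ih (if x > m then x else m)
    by_cases hx : x > m
    · rw [if_pos hx] at h ⊢; omega
    · rw [if_neg hx] at h ⊢; omega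

theorem pvFMax_mem (xs : List Int) : ∀ m : Int, pvFMax xs m = m ∨ pvFMax xs m ∈ xs := by
  induction xs with
  | nil => intro m; simp [pvFMax]
  | cons x xs ih =>
    intro m
    rw [pvFMax_cons]
    by_cases hx : x > m
    · rw [if_pos hx]
      rcases ih x with h | h
      · right; rw [h]; exact List.mem_cons_self
      · right; exact List.mem_cons_of_mem _ h
    · rw [if_neg hx]
      rcases ih m with h | h
      · left; exact h
      · right; exact List.mem_cons_of_mem _ h

theorem pvLoopA_eq (xs : List Int) : ∀ (i m p : Int),
    pvLoopA xs i (m, p) =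
      (pvFMax xs m,
       if m < pvFMax xs m
       then i + (((PySem.List.index? xs (pvFMax xs m)).getD 0 : Nat) : Int)
       else p) := by
  induction xs with
  | nil => intro i m p; simp [pvLoopA, pvFMax]
  | cons x xs ih =>
    intro i m p
    by_cases hx : x > m
    · have hM' : pvFMax (x :: xs) m = pvFMax xs x := by rw [pvFMax_cons, if_pos hx]
      have hge : x ≤ pvFMax xs x := pvFMax_ge xs x
      show pvLoopA xs (i + 1) (if x > m then (x, i) else (m, p)) = _
      rw [if_pos hx, ih (i + 1) x i, hM']
      by_cases hlt : x < pvFMax xs x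
      · have hne : x ≠ pvFMax xs x := ne_of_lt hlt
        have hmem : pvFMax xs x ∈ xs := by
          rcases pvFMax_mem xs x with h | h
          · exact absurd h.symm hne
          · exact h
        obtain ⟨k, hk⟩ := Option.isSome_iff_exists.mp
          ((PySem.List.index?_isSome_iff xs (pvFMax xs x)).mpr hmem)
        rw [PySem.List.index?_cons_of_ne xs hne, hk]
        rw [if_pos hlt, if_pos (lt_of_lt_of_le hx hge)]
        simp only [Option.map_some, Option.getD_some]
        simp only [Prod.mk.injEq]; exact ⟨trivial, by push_cast; omega⟩
      · have heq : pvFMax xs x = x := le_antisymm (by omega) hge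
        rw [if_neg hlt, heq, if_pos hx, PySem.List.index?_cons_self]
        simp
    · have hM' : pvFMax (x :: xs) m = pvFMax xs m := by rw [pvFMax_cons, if_neg hx]
      show pvLoopA xs (i + 1) (if x > m then (x, i) else (m, p)) = _
      rw [if_neg hx, ih (i + 1) m p, hM']
      by_cases hlt : m < pvFMax xs m
      · have hne : x ≠ pvFMax xs m := by omega
        have hmem : pvFMax xs m ∈ xs := by
          rcases pvFMax_mem xs m with h | h
          · omega
          · exact h
        obtain ⟨k, hk⟩ := Option.isSome_iff_exists.mp
          ((PySem.List.index?_isSome_iff xs (pvFMax xs m)).mpr hmem)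
        rw [PySem.List.index?_cons_of_ne xs hne, hk]
        rw [if_pos hlt, if_pos hlt]
        simp only [Option.map_some, Option.getD_some]
        simp only [Prod.mk.injEq]; exact ⟨trivial, by push_cast; omega⟩
      · rw [if_neg hlt, if_neg hlt]

-- ===== VERDICT (by name: the statement is the Claim_ definition above) =====
theorem max_and_index_spec : Claim_equal_max_and_index := by
  intro a _
  show pvLoopA a 0 (0, 0) = max_and_index_alt a
  rw [pvLoopA_eq a 0 0 0]
  show _ = (pvFMax a 0,
    if pvFMax a 0 > 0 then (match PySem.List.index? a (pvFMax a 0) with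
                            | some k => (k : Int)
                            | none => 0) else 0)
  by_cases h : (0 : Int) < pvFMax a 0
  · have hmem : pvFMax a 0 ∈ a := by
      rcases pvFMax_mem a 0 with h' | h'
      · omega
      · exact h'
    obtain ⟨k, hk⟩ := Option.isSome_iff_exists.mp
      ((PySem.List.index?_isSome_iff a (pvFMax a 0)).mpr hmem)
    rw [if_pos h, if_pos h, hk]
    simp
  · rw [if_neg h, if_neg h]
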